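-- pv_equiv track=rewrite | github.com/Captain-Blackstone/Compensatory-frameshifts | Indels_finder_slow.py | stop_in_gene
-- ===== SOURCE A (Python) =====
-- def stop_in_gene(gene):
--     copy = gene[:]
--     copy = copy.replace("-", "")
--     copy = copy[:-3]
--     for q in range(0, len(copy), 3):
--         one = True if copy[q:q + 3].upper() == "TAG" else False
--         two = True if copy[q:q + 3].upper() == "TAA" else False
--         three = True if copy[q:q + 3].upper() == "TGA" else False
--         if one or two or three:
--             return True
--     return False
-- ===== SOURCE B (Python) =====
-- def stop_in_gene(gene):
--     s = gene.replace("-", "").upper()[:-3]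
--     while len(s) >= 3:
--         if s[:3] in ("TAG", "TAA", "TGA"):
--             return True
--         s = s[3:]
--     return False
-- ===== Notes on version B (the rewrite author's own statement) =====
-- stated objective: simpler
-- what changed: B uppercases the dash-free trimmed string once and consumes it three characters at a time with a tuple-membership test, instead of A's index loop over range(0,len,3) that slices and uppercases each codon and tests three separate booleans.
import Mathlib
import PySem

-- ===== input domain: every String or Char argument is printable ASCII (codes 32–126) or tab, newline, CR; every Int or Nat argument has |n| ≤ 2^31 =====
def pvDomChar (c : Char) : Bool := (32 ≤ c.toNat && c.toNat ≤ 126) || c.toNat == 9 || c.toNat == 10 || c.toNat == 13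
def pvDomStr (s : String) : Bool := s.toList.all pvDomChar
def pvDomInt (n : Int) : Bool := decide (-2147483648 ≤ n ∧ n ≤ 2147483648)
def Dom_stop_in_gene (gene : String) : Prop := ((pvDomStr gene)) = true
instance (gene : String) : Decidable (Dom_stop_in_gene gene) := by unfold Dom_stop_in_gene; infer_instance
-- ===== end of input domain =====

-- B is a plainer decomposition of the same O(n) scan: uppercase once, then consume the string
-- three characters at a time with one membership test (no index loop, no per-codon upper).

-- ===== PORT A =====
def stop_in_gene (gene : String) : Bool :=
  let copy := gene.toList
  let copy := PySem.Chars.replace copy ['-'] []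
  let copy := PySem.List.slice copy none (some (-3))
  (PySem.List.pyRange 0 copy.length 3).any fun q =>
    let cod := PySem.Chars.upper (PySem.List.slice copy (some q) (some (q + 3)))
    let one := if cod = ['T','A','G'] then true else false
    let two := if cod = ['T','A','A'] then true else false
    let three := if cod = ['T','G','A'] then true else false
    one || two || three

-- ===== PORT B =====
-- Source B's while-loop: test s[:3] against the stop tuple, then continue on s[3:].
def pvAltLoop : List Char → Bool
  | a :: b :: c :: rest =>
      if [a,b,c] = ['T','A','G'] ∨ [a,b,c] = ['T','A','A'] ∨ [a,b,c] = ['T','G','A'] then true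
      else pvAltLoop rest
  | _ => false

def stop_in_gene_alt (gene : String) : Bool :=
  pvAltLoop (PySem.List.slice (PySem.Chars.upper (PySem.Chars.replace gene.toList ['-'] [])) none (some (-3)))

-- ===== PRECONDITION & SPEC =====
def Spec_stop_in_gene (gene : String) (out : Bool) : Prop := out = stop_in_gene_alt gene
instance (gene : String) (out : Bool) : Decidable (Spec_stop_in_gene gene out) := by unfold Spec_stop_in_gene; infer_instance

-- ===== CLAIM (what is proved, stated in full; the proofs are below) =====
def Claim_equal_stop_in_gene : Prop := ∀ (gene : String), Dom_stop_in_gene gene → Spec_stop_in_gene gene (stop_in_gene gene)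

-- ===== LEMMAS AND PROOFS =====

-- A's loop body, named so the lemmas below can speak about it (definitionally A's lambda)
def pvCheck (cs : List Char) (q : Int) : Bool :=
  let cod := PySem.Chars.upper (PySem.List.slice cs (some q) (some (q + 3)))
  let one := if cod = ['T','A','G'] then true else false
  let two := if cod = ['T','A','A'] then true else false
  let three := if cod = ['T','G','A'] then true else false
  one || two || three

lemma pvAltLoop_nil : pvAltLoop [] = false := rfl
lemma pvAltLoop_one (x : Char) : pvAltLoop [x] = false := rfl
lemma pvAltLoop_two (x y : Char) : pvAltLoop [x, y] = false := rfl

-- slicing off the last three commutes with the character-wise uppercase map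
lemma pv_slice_upper (xs : List Char) :
    PySem.List.slice (PySem.Chars.upper xs) none (some (-3))
      = PySem.Chars.upper (PySem.List.slice xs none (some (-3))) := by
  rw [PySem.List.slice_to_neg_ofNat _ 3 (by omega),
      PySem.List.slice_to_neg_ofNat _ 3 (by omega)]
  simp [PySem.Chars.upper, List.map_take]

lemma pv_any_congr_mem {l : List Int} {p q : Int → Bool} (h : ∀ a ∈ l, p a = q a) :
    l.any p = l.any q := by
  induction l with
  | nil => rfl
  | cons x xs ih =>
      simp only [List.any_cons, h x (by simp)]
      rw [ih (fun a ha => h a (by simp [ha]))]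

lemma pv_pyRange3_cons (n : Int) (h : 0 < n) :
    PySem.List.pyRange 0 n 3 = 0 :: (PySem.List.pyRange 0 (n - 3) 3).map (· + 3) := by
  rw [PySem.List.pyRange_of_pos 0 n (by omega), PySem.List.pyRange_of_pos 0 (n - 3) (by omega)]
  have hcnt : ((n - 0 + 3 - 1) / 3).toNat
      = (if 0 < n - 3 then ((n - 3 - 0 + 3 - 1) / 3).toNat else 0) + 1 := by
    split_ifs with h3 <;> omega
  rw [if_pos h, hcnt, List.range_succ_eq_map]
  simp only [List.map_cons, List.map_map]
  congr 1

lemma pv_main : ∀ cs : List Char,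
    (PySem.List.pyRange 0 cs.length 3).any (pvCheck cs) = pvAltLoop (PySem.Chars.upper cs)
  | [] => by
      rw [show (([] : List Char).length : Int) = 0 by simp,
          show PySem.List.pyRange 0 0 3 = [] by decide]
      simp [pvAltLoop_nil, PySem.Chars.upper]
  | [a] => by
      rw [show ((([a] : List Char).length : Int)) = 1 by simp,
          show PySem.List.pyRange 0 1 3 = [0] by decide]
      simp only [List.any_cons, List.any_nil, Bool.or_false, pvCheck]
      rw [PySem.List.slice_toNat _ (by omega) (by omega)]
      norm_num [PySem.Chars.upper, pvAltLoop_one, show Int.toNat 3 = 3 from rfl]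
      refine ⟨⟨fun _ => by simp, fun _ => by simp⟩, fun _ => by simp⟩
  | [a, b] => by
      rw [show ((([a, b] : List Char).length : Int)) = 2 by simp,
          show PySem.List.pyRange 0 2 3 = [0] by decide]
      simp only [List.any_cons, List.any_nil, Bool.or_false, pvCheck]
      rw [PySem.List.slice_toNat _ (by omega) (by omega)]
      norm_num [PySem.Chars.upper, pvAltLoop_two, show Int.toNat 3 = 3 from rfl]
  | a :: b :: c :: rest => by
      rw [show (((a :: b :: c :: rest).length : Int)) = (rest.length : Int) + 3 by simp; omega,
          pv_pyRange3_cons _ (by omega), List.any_cons, List.any_map,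
          show (rest.length : Int) + 3 - 3 = (rest.length : Int) by omega]
      have htail : ((PySem.List.pyRange 0 (rest.length : Int) 3).any
          (pvCheck (a :: b :: c :: rest) ∘ (· + 3)))
          = (PySem.List.pyRange 0 (rest.length : Int) 3).any (pvCheck rest) := by
        apply pv_any_congr_mem
        intro q hq
        have hq0 : 0 ≤ q := ((PySem.List.mem_pyRange_iff_of_pos (by omega) q).1 hq).1
        simp only [Function.comp_apply, pvCheck]
        rw [PySem.List.slice_toNat _ (by omega) (by omega),
            PySem.List.slice_toNat _ (by omega) (by omega)]
        rw [show (q + 3 + 3).toNat - (q + 3).toNat = 3 by omega,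
            show (q + 3).toNat - q.toNat = 3 by omega,
            show (q + 3).toNat = (q.toNat + 2) + 1 by omega,
            List.drop_succ_cons,
            show q.toNat + 2 = (q.toNat + 1) + 1 from rfl, List.drop_succ_cons,
            List.drop_succ_cons]
      rw [htail, pv_main rest]
      have hhead : pvCheck (a :: b :: c :: rest) 0
          = ((if [PySem.Chars.upperChar a, PySem.Chars.upperChar b, PySem.Chars.upperChar c] = ['T','A','G'] then true else false)
            || (if [PySem.Chars.upperChar a, PySem.Chars.upperChar b, PySem.Chars.upperChar c] = ['T','A','A'] then true else false)
            || (if [PySem.Chars.upperChar a, PySem.Chars.upperChar b, PySem.Chars.upperChar c] = ['T','G','A'] then true else false)) := by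
        simp only [pvCheck]
        rw [PySem.List.slice_toNat _ (by omega) (by omega)]
        norm_num [PySem.Chars.upper, show Int.toNat 3 = 3 from rfl]
      rw [hhead]
      simp only [PySem.Chars.upper, List.map_cons]
      rw [show pvAltLoop (PySem.Chars.upperChar a :: PySem.Chars.upperChar b :: PySem.Chars.upperChar c :: List.map PySem.Chars.upperChar rest)
            = (if [PySem.Chars.upperChar a, PySem.Chars.upperChar b, PySem.Chars.upperChar c] = ['T','A','G']
                ∨ [PySem.Chars.upperChar a, PySem.Chars.upperChar b, PySem.Chars.upperChar c] = ['T','A','A']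
                ∨ [PySem.Chars.upperChar a, PySem.Chars.upperChar b, PySem.Chars.upperChar c] = ['T','G','A'] then true
              else pvAltLoop (List.map PySem.Chars.upperChar rest)) from rfl]
      by_cases hd : ([PySem.Chars.upperChar a, PySem.Chars.upperChar b, PySem.Chars.upperChar c] = ['T','A','G']
          ∨ [PySem.Chars.upperChar a, PySem.Chars.upperChar b, PySem.Chars.upperChar c] = ['T','A','A']
          ∨ [PySem.Chars.upperChar a, PySem.Chars.upperChar b, PySem.Chars.upperChar c] = ['T','G','A'])
      · rw [if_pos hd]
        rcases hd with h | h | h <;> simp [h]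
      · rw [if_neg hd]
        push_neg at hd
        simp [hd.1, hd.2.1, hd.2.2]

-- ===== VERDICT (by name: the statement is the Claim_ definition above) =====
theorem stop_in_gene_spec : Claim_equal_stop_in_gene := by
  intro gene _
  unfold Spec_stop_in_gene stop_in_gene stop_in_gene_alt
  rw [pv_slice_upper]
  exact pv_main _
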